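-- pv_equiv track=rewrite | github.com/VirajAnand-02/networkingLAB | BitStuffing/bitStuffing.py | bit_destuff
-- ===== SOURCE A (Python) =====
-- def bit_destuff(stuffed_data):
--     destuffed = ""
--     count = 0
--     i = 0
--     while i < len(stuffed_data):
--         bit = stuffed_data[i]
--         if bit == "1":
--             count += 1
--             destuffed += bit
--             if count == 5:
--                 # Skip the stuffed 0
--                 i += 1
--                 count = 0
--         else:
--             destuffed += bit
--             count = 0
--         i += 1
--     return destuffed
-- ===== SOURCE B (Python) =====
-- def bit_destuff(stuffed_data):
--     out = []
--     s = stuffed_data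
--     while True:
--         idx = s.find("11111")
--         if idx == -1:
--             out.append(s)
--             break
--         out.append(s[:idx + 5])
--         s = s[idx + 6:]
--     return "".join(out)
-- ===== Notes on version B (the rewrite author's own statement) =====
-- stated objective: faster
-- what changed: Replaces the char-by-char consecutive-ones counter with repeated substring search: find the first "11111", emit everything up to and including it, drop the one stuffed bit after it, and recurse on the remainder; pieces are collected in a list and joined once instead of per-character string concatenation.
import Mathlib
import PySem

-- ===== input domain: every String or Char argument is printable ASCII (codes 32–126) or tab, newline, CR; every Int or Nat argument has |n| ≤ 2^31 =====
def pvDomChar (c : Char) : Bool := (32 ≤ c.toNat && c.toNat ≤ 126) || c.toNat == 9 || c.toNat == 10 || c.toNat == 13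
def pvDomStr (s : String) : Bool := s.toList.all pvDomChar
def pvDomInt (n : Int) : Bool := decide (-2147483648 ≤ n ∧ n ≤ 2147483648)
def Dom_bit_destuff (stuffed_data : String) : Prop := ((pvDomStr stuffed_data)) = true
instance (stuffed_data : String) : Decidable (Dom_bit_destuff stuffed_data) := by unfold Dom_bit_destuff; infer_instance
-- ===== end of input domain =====

-- B replaces A's per-character counter (with quadratic string +=) by repeated substring search
-- for "11111" plus slicing, joining the pieces once (objective: faster; measured).

-- ===== PORT A =====
-- while loop over the index: recursion over the remaining characters, carrying `count`;
-- `i += 1` inside the `count == 5` branch (skip the stuffed bit) is `rest.drop 1`.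
def bitDestuffGoA : List Char → Nat → List Char
  | [], _ => []
  | ch :: rest, count =>
    if ch = '1' then
      if count + 1 = 5 then ch :: bitDestuffGoA (rest.drop 1) 0
      else ch :: bitDestuffGoA rest (count + 1)
    else ch :: bitDestuffGoA rest 0
termination_by l _ => l.length
decreasing_by
  all_goals simp; try omega

def bit_destuff (stuffed_data : String) : String :=
  String.ofList (bitDestuffGoA stuffed_data.toList 0)

-- ===== PORT B =====
def fiveOnes : List Char := List.replicate 5 '1'

-- the `while True` loop of B: s.find("11111") is PySem.Chars.find, the slices are PySem.List.slice.
def bitDestuffGoB (s : List Char) : List Char :=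
  let idx := PySem.Chars.find s fiveOnes
  if h : idx = -1 then s
  else PySem.List.slice s none (some (idx + 5)) ++
       bitDestuffGoB (PySem.List.slice s (some (idx + 6)) none)
termination_by s.length
decreasing_by
  have hs := PySem.Chars.findFrom_natCast_spec s fiveOnes 0 (by omega)
  rw [Nat.cast_zero, PySem.Chars.findFrom_zero] at hs
  obtain ⟨h0, hpre, -⟩ := hs h
  have hidx : PySem.Chars.find s fiveOnes = ((PySem.Chars.find s fiveOnes).toNat : Int) :=
    (Int.toNat_of_nonneg h0).symm
  have hlen : 5 ≤ (s.drop (PySem.Chars.find s fiveOnes).toNat).length := by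
    simpa [fiveOnes] using hpre.length_le
  rw [hidx, show ((PySem.Chars.find s fiveOnes).toNat : Int) + 6 =
        (((PySem.Chars.find s fiveOnes).toNat + 6 : Nat) : Int) by push_cast; ring,
      PySem.List.slice_from_natCast]
  simp only [List.length_drop] at *
  omega

def bit_destuff_alt (stuffed_data : String) : String :=
  String.ofList (bitDestuffGoB stuffed_data.toList)

-- ===== PRECONDITION & SPEC =====
def Spec_bit_destuff (stuffed_data : String) (out : String) : Prop := out = bit_destuff_alt stuffed_data
instance (stuffed_data : String) (out : String) : Decidable (Spec_bit_destuff stuffed_data out) := by unfold Spec_bit_destuff; infer_instance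

-- ===== CLAIM (what is proved, stated in full; the proofs are below) =====
def Claim_equal_bit_destuff : Prop := ∀ (stuffed_data : String), Dom_bit_destuff stuffed_data → Spec_bit_destuff stuffed_data (bit_destuff stuffed_data)

-- ===== LEMMAS AND PROOFS =====

-- a block of < 5 ones followed by a non-'1' cannot start an occurrence of "11111"
lemma fiveOnes_not_prefix (c : Nat) (hc : c < 5) (ch : Char) (hch : ch ≠ '1')
    (rest : List Char) : ¬ fiveOnes <+: List.replicate c '1' ++ ch :: rest := by
  intro h
  have hget := h.getElem (i := c) (by simp [fiveOnes]; omega)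
  simp [fiveOnes] at hget
  interval_cases c <;> exact hch hget.symm

-- A's loop from state `count = c` returns its input unchanged when "11111" occurs nowhere
-- in (replicate c '1' ++ l), i.e. when the pending ones cannot be completed.
lemma goA_no_occurrence : ∀ (l : List Char) (c : Nat), c < 5 →
    (∀ i : Nat, ¬ fiveOnes <+: (List.replicate c '1' ++ l).drop i) →
    bitDestuffGoA l c = l := by
  intro l
  induction l with
  | nil => intro c _ _; simp [bitDestuffGoA]
  | cons ch rest ih =>
    intro c hc hno
    by_cases hch : ch = '1'
    · subst hch
      by_cases h5 : c + 1 = 5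
      · exfalso
        have hc4 : c = 4 := by omega
        subst hc4
        apply hno 0
        rw [List.drop_zero,
          show List.replicate 4 '1' ++ '1' :: rest = fiveOnes ++ rest from by
            simp [fiveOnes, List.replicate_succ']]
        exact List.prefix_append _ _
      · rw [show bitDestuffGoA ('1' :: rest) c = '1' :: bitDestuffGoA rest (c + 1) from by
          simp [bitDestuffGoA, h5]]
        rw [ih (c + 1) (by omega) (by
          intro i
          have h := hno i
          rwa [show List.replicate c '1' ++ '1' :: rest = List.replicate (c + 1) '1' ++ rest from by
            simp [List.replicate_succ', List.append_assoc]] at h)]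
    · rw [show bitDestuffGoA (ch :: rest) c = ch :: bitDestuffGoA rest 0 from by
        simp [bitDestuffGoA, hch]]
      rw [ih 0 (by omega) (by
        intro i
        have h := hno (c + 1 + i)
        rw [List.drop_append, List.drop_replicate] at h
        simp only [List.length_replicate] at h
        rw [show c + 1 + i - c = i + 1 from by omega,
          show c - (c + 1 + i) = 0 from by omega] at h
        simpa using h)]

-- A's loop from state `count = c`, when the first occurrence of "11111" in
-- (replicate c '1' ++ l) is at position j, emits l.take (j+5-c), skips one char, restarts.
lemma goA_first_occurrence : ∀ (l : List Char) (c j : Nat), c < 5 →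
    fiveOnes <+: (List.replicate c '1' ++ l).drop j →
    (∀ i : Nat, i < j → ¬ fiveOnes <+: (List.replicate c '1' ++ l).drop i) →
    bitDestuffGoA l c = l.take (j + 5 - c) ++ bitDestuffGoA (l.drop (j + 6 - c)) 0 := by
  intro l
  induction l with
  | nil =>
    intro c j hc hpre _
    exfalso
    have hlen := hpre.length_le
    simp [fiveOnes] at hlen
    omega
  | cons ch rest ih =>
    intro c j hc hpre hmin
    by_cases hch : ch = '1'
    · subst hch
      by_cases h5 : c + 1 = 5
      · have hc4 : c = 4 := by omega
        subst hc4
        have hj0 : j = 0 := by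
          by_contra hj
          exact hmin 0 (by omega) (by
            rw [List.drop_zero,
              show List.replicate 4 '1' ++ '1' :: rest = fiveOnes ++ rest from by
                simp [fiveOnes, List.replicate_succ']]
            exact List.prefix_append _ _)
        subst hj0
        rw [show bitDestuffGoA ('1' :: rest) 4 = '1' :: bitDestuffGoA (rest.drop 1) 0 from by
          simp [bitDestuffGoA]]
        simp
      · have heq : List.replicate c '1' ++ '1' :: rest = List.replicate (c + 1) '1' ++ rest := by
          simp [List.replicate_succ', List.append_assoc]
        rw [show bitDestuffGoA ('1' :: rest) c = '1' :: bitDestuffGoA rest (c + 1) from by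
          simp [bitDestuffGoA, h5]]
        rw [ih (c + 1) j (by omega) (by rwa [heq] at hpre)
          (by intro i hi; have h := hmin i hi; rwa [heq] at h)]
        rw [show j + 5 - c = (j + 5 - (c + 1)) + 1 from by omega,
          show j + 6 - c = (j + 6 - (c + 1)) + 1 from by omega]
        simp [List.take_succ_cons, List.drop_succ_cons]
    · have hj : c + 1 ≤ j := by
        by_contra hlt
        simp only [not_le] at hlt
        apply fiveOnes_not_prefix (c - j) (by omega) ch hch rest
        have hd : (List.replicate c '1' ++ ch :: rest).drop j
            = List.replicate (c - j) '1' ++ ch :: rest := by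
          rw [List.drop_append_of_le_length (by simp; omega), List.drop_replicate]
        rwa [hd] at hpre
      have hdrop : ∀ i : Nat,
          (List.replicate c '1' ++ ch :: rest).drop (c + 1 + i) = rest.drop i := by
        intro i
        rw [List.drop_append, List.drop_replicate]
        simp only [List.length_replicate]
        rw [show c + 1 + i - c = i + 1 from by omega,
          show c - (c + 1 + i) = 0 from by omega]
        simp
      have hpre' : fiveOnes <+: (List.replicate 0 '1' ++ rest).drop (j - (c + 1)) := by
        rw [show j = c + 1 + (j - (c + 1)) from by omega, hdrop] at hpre
        simpa using hpre
      have hmin' : ∀ i : Nat, i < j - (c + 1) →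
          ¬ fiveOnes <+: (List.replicate 0 '1' ++ rest).drop i := by
        intro i hi
        have h := hmin (c + 1 + i) (by omega)
        rw [hdrop] at h
        simpa using h
      rw [show bitDestuffGoA (ch :: rest) c = ch :: bitDestuffGoA rest 0 from by
        simp [bitDestuffGoA, hch]]
      rw [ih 0 (j - (c + 1)) (by omega) hpre' hmin']
      rw [show j + 5 - c = ((j - (c + 1)) + 5 - 0) + 1 from by omega,
        show j + 6 - c = ((j - (c + 1)) + 6 - 0) + 1 from by omega]
      simp [List.take_succ_cons, List.drop_succ_cons]

lemma goA_eq_goB : ∀ (n : Nat) (l : List Char), l.length ≤ n →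
    bitDestuffGoA l 0 = bitDestuffGoB l := by
  intro n
  induction n with
  | zero =>
    intro l hl
    have hnil : l = [] := List.eq_nil_of_length_eq_zero (by omega)
    subst hnil
    rw [bitDestuffGoB]
    simp [bitDestuffGoA, show PySem.Chars.find [] fiveOnes = -1 from by decide]
  | succ n ihn =>
    intro l hl
    by_cases hfind : PySem.Chars.find l fiveOnes = -1
    · rw [bitDestuffGoB]
      simp only [hfind, reduceDIte]
      apply goA_no_occurrence l 0 (by omega)
      intro i hpre
      have hinf : fiveOnes <:+: l := hpre.isInfix.trans (l.drop_suffix i).isInfix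
      exact ((PySem.Chars.find_eq_neg_one_iff l fiveOnes).mp hfind) hinf
    · have hs := PySem.Chars.findFrom_natCast_spec l fiveOnes 0 (by omega)
      rw [Nat.cast_zero, PySem.Chars.findFrom_zero] at hs
      obtain ⟨h0, hpre, hmin⟩ := hs hfind
      have hcast : PySem.Chars.find l fiveOnes
          = (((PySem.Chars.find l fiveOnes).toNat : Nat) : Int) :=
        (Int.toNat_of_nonneg h0).symm
      have hlen5 : 5 ≤ (l.drop (PySem.Chars.find l fiveOnes).toNat).length := by
        simpa [fiveOnes] using hpre.length_le
      rw [bitDestuffGoB]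
      simp only [hfind, dite_false]
      rw [hcast,
        show (((PySem.Chars.find l fiveOnes).toNat : Nat) : Int) + 5
          = (((PySem.Chars.find l fiveOnes).toNat + 5 : Nat) : Int) from by push_cast; ring,
        show (((PySem.Chars.find l fiveOnes).toNat : Nat) : Int) + 6
          = (((PySem.Chars.find l fiveOnes).toNat + 6 : Nat) : Int) from by push_cast; ring,
        PySem.List.slice_to_natCast, PySem.List.slice_from_natCast]
      rw [show bitDestuffGoA l 0
          = l.take ((PySem.Chars.find l fiveOnes).toNat + 5 - 0)
            ++ bitDestuffGoA (l.drop ((PySem.Chars.find l fiveOnes).toNat + 6 - 0)) 0 from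
        goA_first_occurrence l 0 (PySem.Chars.find l fiveOnes).toNat (by omega)
          (by simpa using hpre)
          (by intro i hi; simpa using hmin i (by omega) hi)]
      simp only [Nat.sub_zero]
      congr 1
      apply ihn
      simp only [List.length_drop] at *
      omega

-- ===== VERDICT (by name: the statement is the Claim_ definition above) =====
theorem bit_destuff_spec : Claim_equal_bit_destuff := by
  intro s _
  unfold Spec_bit_destuff bit_destuff bit_destuff_alt
  exact congrArg String.ofList (goA_eq_goB s.toList.length s.toList le_rfl)
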